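-- pv_equiv track=rewrite | github.com/Kirishimya/ConversorDeBase | main.py | sub_digits
-- ===== SOURCE A (Python) =====
-- def remove_leading_zeros(digits):
--     while len(digits) > 1 and digits[0] == 0:
--         digits.pop(0)
--     return digits
--
-- def sub_digits(a, b, base):
--     a, b = a[::-1], b[::-1]
--     max_len = max(len(a), len(b))
--     a += [0] * (max_len - len(a))
--     b += [0] * (max_len - len(b))
--     borrow = 0
--     result = []
--     for i in range(max_len):
--         s = a[i] - b[i] - borrow
--         if s < 0:
--             s += base
--             borrow = 1
--         else:
--             borrow = 0
--         result.append(s)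
--     return remove_leading_zeros(result[::-1])
-- ===== SOURCE B (Python) =====
-- def sub_digits(a, b, base):
--     n = max(len(a), len(b))
--     a = [0] * (n - len(a)) + a
--     b = [0] * (n - len(b)) + b
--     t = [x - y for x, y in zip(a, b)]
--     borrows = [0] * n
--     c = 0
--     for i in range(n - 1, 0, -1):
--         c = 1 if (t[i] < 0 or (t[i] == 0 and c == 1)) else 0
--         borrows[i - 1] = c
--     out = [s - c + base if s - c < 0 else s - c for s, c in zip(t, borrows)]
--     for i in range(n):
--         if out[i] != 0:
--             return out[i:]
--     return out[-1:]
-- ===== Notes on version B (the rewrite author's own statement) =====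
-- stated objective: alternative
-- what changed: Replaces A's fused reverse/pad/subtract-with-borrow loop plus destructive zero-popping by a borrow-lookahead pipeline on the big-endian arrays: elementwise differences, a generate/propagate borrow scan filling a preallocated borrow array, an elementwise correction pass, and a scan-for-first-nonzero slice to strip leading zeros.
import Mathlib
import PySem

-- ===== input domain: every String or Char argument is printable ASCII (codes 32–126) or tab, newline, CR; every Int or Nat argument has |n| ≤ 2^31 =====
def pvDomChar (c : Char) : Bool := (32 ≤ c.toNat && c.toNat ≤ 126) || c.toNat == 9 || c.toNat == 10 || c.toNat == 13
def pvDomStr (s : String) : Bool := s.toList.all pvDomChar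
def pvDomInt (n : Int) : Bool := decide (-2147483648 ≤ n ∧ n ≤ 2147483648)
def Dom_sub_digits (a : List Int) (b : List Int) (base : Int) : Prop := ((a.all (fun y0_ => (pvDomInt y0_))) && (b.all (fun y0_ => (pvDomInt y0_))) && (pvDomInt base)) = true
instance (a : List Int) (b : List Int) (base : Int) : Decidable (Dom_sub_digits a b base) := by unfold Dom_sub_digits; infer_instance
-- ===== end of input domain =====

-- B replaces A's fused reverse/pad/subtract-with-borrow loop and destructive zero-popping by a
-- borrow-lookahead pipeline over the big-endian arrays (differences, borrow scan, correction,
-- scan-and-slice strip): objective 'alternative'. Return-value equivalence; neither version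
-- mutates its caller-visible arguments.

-- ===== PORT A =====
-- remove_leading_zeros (the Python pops from its local list; return value is what matters here)
def pvRlz : List Int → List Int
  | x :: y :: ys => if x = 0 then pvRlz (y :: ys) else x :: y :: ys
  | l => l

-- for i in range(max_len): s = a[i]-b[i]-borrow; …; result.append(s)
-- (structural recursion over the two equal-length reversed-and-padded lists, same state)
def pvSubLoop (base : Int) : List Int → List Int → Int → List Int
  | x :: xs, y :: ys, borrow =>
      let s := x - y - borrow
      if s < 0 then (s + base) :: pvSubLoop base xs ys 1
      else s :: pvSubLoop base xs ys 0
  | _, _, _ => []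

def sub_digits (a : List Int) (b : List Int) (base : Int) : List Int :=
  let ar := a.reverse   -- a[::-1] (= PySem.List.slice? a none none (-1), exact)
  let br := b.reverse
  let maxLen := max ar.length br.length
  let ar' := ar ++ List.replicate (maxLen - ar.length) 0
  let br' := br ++ List.replicate (maxLen - br.length) 0
  pvRlz (pvSubLoop base ar' br' 0).reverse

-- ===== PORT B =====
-- for i in range(n-1, 0, -1): c = 1 if (t[i] < 0 or (t[i] == 0 and c == 1)) else 0; borrows[i-1] = c
-- (recursion on the running index i = j+1, writing borrows[i-1] in place; t[i] is in range, getD is exact)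
def pvBScan (t : List Int) : Nat → Int → List Int → List Int
  | 0, _, brs => brs
  | j + 1, c, brs =>
      let c' : Int := if t.getD (j + 1) 0 < 0 ∨ (t.getD (j + 1) 0 = 0 ∧ c = 1) then 1 else 0
      pvBScan t j c' (brs.set j c')

-- for i in range(n): if out[i] != 0: return out[i:]   /   return out[-1:]
-- (out[i:] with 0 ≤ i is List.drop; out[-1:] is drop (len-1), cf. PySem.List.slice_from_neg_one)
def pvFirstNZ (out : List Int) (i : Nat) : List Int :=
  if i < out.length then
    (if out.getD i 0 ≠ 0 then out.drop i else pvFirstNZ out (i + 1))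
  else out.drop (out.length - 1)
termination_by out.length - i

def sub_digits_alt (a : List Int) (b : List Int) (base : Int) : List Int :=
  let n := max a.length b.length
  let aB := List.replicate (n - a.length) 0 ++ a
  let bB := List.replicate (n - b.length) 0 ++ b
  let t := List.zipWith (fun x y => x - y) aB bB
  let brs := pvBScan t (n - 1) 0 (List.replicate n 0)
  let out := List.zipWith (fun s c => if s - c < 0 then s - c + base else s - c) t brs
  pvFirstNZ out 0

-- ===== PRECONDITION & SPEC =====
def Spec_sub_digits (a : List Int) (b : List Int) (base : Int) (out : List Int) : Prop := out = sub_digits_alt a b base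
instance (a : List Int) (b : List Int) (base : Int) (out : List Int) : Decidable (Spec_sub_digits a b base out) := by unfold Spec_sub_digits; infer_instance

-- ===== CLAIM (what is proved, stated in full; the proofs are below) =====
def Claim_equal_sub_digits : Prop := ∀ (a : List Int) (b : List Int) (base : Int), Dom_sub_digits a b base → Spec_sub_digits a b base (sub_digits a b base)

-- ===== LEMMAS AND PROOFS =====

-- little-endian fused subtract-with-borrow over the element-wise differences
def pvF (base : Int) : List Int → Int → List Int
  | [], _ => []
  | s :: us, c =>
      let d := s - c
      if d < 0 then (d + base) :: pvF base us 1 else d :: pvF base us 0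

-- the borrow-in values pvBScan writes at big-endian positions 0..j-1
def pvBL (t : List Int) : Nat → Int → List Int
  | 0, _ => []
  | j + 1, c =>
      let c' : Int := if t.getD (j + 1) 0 < 0 ∨ (t.getD (j + 1) 0 = 0 ∧ c = 1) then 1 else 0
      pvBL t j c' ++ [c']

theorem pvSubLoop_eq_F (base : Int) : ∀ (x y : List Int) (c : Int),
    pvSubLoop base x y c = pvF base (List.zipWith (fun p q => p - q) x y) c := by
  intro x
  induction x with
  | nil => intro y c; cases y <;> simp [pvSubLoop, pvF]
  | cons p xs ih =>
    intro y c
    cases y with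
    | nil => simp [pvSubLoop, pvF]
    | cons q ys =>
      simp only [pvSubLoop, List.zipWith_cons_cons, pvF, ih]

theorem pvBL_length (t : List Int) : ∀ (j : Nat) (c : Int), (pvBL t j c).length = j := by
  intro j
  induction j with
  | zero => intro c; simp [pvBL]
  | succ m ih => intro c; simp [pvBL, ih]

theorem pvBL_append (t' : List Int) (s : Int) : ∀ (j : Nat) (c : Int), j < t'.length →
    pvBL (t' ++ [s]) j c = pvBL t' j c := by
  intro j
  induction j with
  | zero => intro c _; simp [pvBL]
  | succ m ih =>
    intro c hj
    have hget : (t' ++ [s]).getD (m + 1) 0 = t'.getD (m + 1) 0 := by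
      have h1 : m + 1 < t'.length := hj
      simp [List.getD_eq_getElem?_getD, List.getElem?_append_left h1]
    simp only [pvBL, hget, ih _ (by omega)]

theorem pvDropSet (l : List Int) (j : Nat) (v : Int) (hj : j < l.length) :
    (l.set j v).drop j = v :: l.drop (j + 1) := by
  rw [List.drop_eq_getElem_cons (by simpa using hj)]
  rw [List.getElem_set_self]
  rw [List.drop_set_of_lt (by omega)]

theorem pvBScan_eq (t : List Int) : ∀ (j : Nat) (c : Int) (brs : List Int), j ≤ brs.length →
    pvBScan t j c brs = pvBL t j c ++ brs.drop j := by
  intro j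
  induction j with
  | zero => intro c brs _; simp [pvBScan, pvBL]
  | succ m ih =>
    intro c brs hm
    simp only [pvBScan, pvBL]
    rw [ih _ _ (by simpa using Nat.le_of_succ_le hm)]
    rw [pvDropSet brs m _ (by omega)]
    simp

theorem pvMain (base : Int) : ∀ (t : List Int) (c : Int), (c = 0 ∨ c = 1) →
    List.zipWith (fun s c => if s - c < 0 then s - c + base else s - c) t (pvBL t (t.length - 1) c ++ [c])
      = (pvF base t.reverse c).reverse := by
  intro t
  induction t using List.reverseRecOn with
  | nil => intro c _; simp [pvF]
  | append_singleton t' s0 ih =>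
    intro c hc
    rcases List.eq_nil_or_concat' t' with ht | ⟨u, z, hu⟩
    · subst ht
      simp only [List.nil_append, List.length_cons, List.length_nil, Nat.zero_add,
        Nat.sub_self, pvBL, List.reverse_cons, List.reverse_nil, List.nil_append,
        pvF, List.zipWith_cons_cons, List.zipWith_nil_right]
      by_cases hd : s0 - c < 0 <;> simp [hd]
    · have hm : 1 ≤ t'.length := by subst hu; simp
      have hlen : (t' ++ [s0]).length - 1 = t'.length := by simp
      rw [hlen]
      obtain ⟨m', hm'⟩ : ∃ m', t'.length = m' + 1 := ⟨t'.length - 1, by omega⟩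
      rw [hm']
      have hget : (t' ++ [s0]).getD (m' + 1) 0 = s0 := by
        rw [← hm']
        simp [List.getD_eq_getElem?_getD]
      simp only [pvBL, hget]
      set c1 : Int := if s0 < 0 ∨ (s0 = 0 ∧ c = 1) then 1 else 0 with hc1
      have hc1' : c1 = 0 ∨ c1 = 1 := by
        rw [hc1]; split_ifs <;> simp
      rw [pvBL_append t' s0 m' c1 (by omega)]
      rw [List.zipWith_append (by simp [pvBL_length]; omega)]
      have ih' := ih c1 hc1'
      rw [hm'] at ih'
      simp only [Nat.add_sub_cancel] at ih'
      rw [ih']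
      rw [List.reverse_append]
      simp only [List.reverse_cons, List.reverse_nil, List.nil_append,
        List.singleton_append, List.zipWith_cons_cons, List.zipWith_nil_right]
      have hb : (if s0 - c < 0 then (1:Int) else 0) = c1 := by
        rw [hc1]
        rcases hc with h | h <;> subst h <;> split_ifs <;> first | rfl | omega
      by_cases hd : s0 - c < 0
      · rw [if_pos hd]
        rw [if_pos hd] at hb
        rw [show pvF base (s0 :: t'.reverse) c = (s0 - c + base) :: pvF base t'.reverse 1 from by
          rw [pvF]; simp only [if_pos hd]]
        rw [List.reverse_cons, ← hb]
      · rw [if_neg hd]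
        rw [if_neg hd] at hb
        rw [show pvF base (s0 :: t'.reverse) c = (s0 - c) :: pvF base t'.reverse 0 from by
          rw [pvF]; simp only [if_neg hd]]
        rw [List.reverse_cons, ← hb]

theorem pvFirstNZ_shift (d : Int) : ∀ (t : List Int) (i : Nat), t ≠ [] →
    pvFirstNZ (d :: t) (i + 1) = pvFirstNZ t i := by
  intro t i
  induction h : t.length - i generalizing i with
  | zero =>
    intro ht
    conv_lhs => rw [pvFirstNZ]
    conv_rhs => rw [pvFirstNZ]
    have hni : ¬ i < t.length := by omega
    have hni' : ¬ i + 1 < (d :: t).length := by simp; omega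
    rw [if_neg hni, if_neg hni']
    have h1 : (d :: t).length - 1 = t.length := by simp
    rw [h1]
    obtain ⟨m, hm⟩ : ∃ m, t.length = m + 1 := ⟨t.length - 1, by
      have := List.length_pos_iff.mpr ht; omega⟩
    rw [hm, List.drop_succ_cons]
    simp
  | succ k ihk =>
    intro ht
    conv_lhs => rw [pvFirstNZ]
    conv_rhs => rw [pvFirstNZ]
    have hi : i < t.length := by omega
    have hi' : i + 1 < (d :: t).length := by simp; omega
    rw [if_pos hi, if_pos hi']
    have hget : (d :: t).getD (i + 1) 0 = t.getD i 0 := by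
      simp [List.getD_eq_getElem?_getD]
    rw [hget]
    by_cases hz : t.getD i 0 ≠ 0
    · rw [if_pos hz, if_pos hz, List.drop_succ_cons]
    · rw [if_neg hz, if_neg hz, ihk (i + 1) (by omega) ht]

theorem pvFirstNZ_eq_rlz : ∀ (out : List Int), pvFirstNZ out 0 = pvRlz out := by
  intro out
  induction out with
  | nil => rw [pvFirstNZ]; simp [pvRlz]
  | cons d t ih =>
    cases t with
    | nil =>
      rw [pvFirstNZ]
      by_cases hd : d ≠ 0
      · simp [pvRlz, hd]
      · simp only [List.length_cons, List.length_nil, Nat.zero_add, Nat.lt_irrefl,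
          Nat.lt_add_one, if_pos]
        rw [if_neg (by simpa using hd)]
        rw [pvFirstNZ]
        simp [pvRlz]
    | cons e es =>
      rw [pvFirstNZ]
      simp only [List.length_cons, List.getD_cons_zero]
      rw [if_pos (by omega)]
      by_cases hd : d ≠ 0
      · rw [if_pos hd]
        simp [pvRlz, hd]
      · rw [if_neg hd]
        have hd0 : d = 0 := by simpa using hd
        rw [pvFirstNZ_shift d (e :: es) 0 (by simp)]
        rw [ih]
        simp [pvRlz, hd0]

-- ===== VERDICT (by name: the statement is the Claim_ definition above) =====
theorem sub_digits_spec : Claim_equal_sub_digits := by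
  intro a b base _hdom
  unfold Spec_sub_digits sub_digits sub_digits_alt
  simp only [List.length_reverse]
  set n := max a.length b.length with hn
  set aB := List.replicate (n - a.length) 0 ++ a with haB
  set bB := List.replicate (n - b.length) 0 ++ b with hbB
  set t := List.zipWith (fun x y => x - y) aB bB with ht
  have hla : a.length ≤ n := by rw [hn]; exact Nat.le_max_left _ _
  have hlb : b.length ≤ n := by rw [hn]; exact Nat.le_max_right _ _
  have haBlen : aB.length = n := by simp only [haB, List.length_append, List.length_replicate]; omega
  have hbBlen : bB.length = n := by simp only [hbB, List.length_append, List.length_replicate]; omega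
  have htlen : t.length = n := by simp [ht, List.length_zipWith, haBlen, hbBlen]
  have hrevA : a.reverse ++ List.replicate (n - a.length) 0 = aB.reverse := by
    simp [haB, List.reverse_append]
  have hrevB : b.reverse ++ List.replicate (n - b.length) 0 = bB.reverse := by
    simp [hbB, List.reverse_append]
  rw [pvFirstNZ_eq_rlz]
  rw [hrevA, hrevB]
  rw [pvSubLoop_eq_F]
  have hzrev : List.zipWith (fun p q => p - q) aB.reverse bB.reverse = t.reverse := by
    rw [ht, List.reverse_zipWith (by rw [haBlen, hbBlen])]
  rw [hzrev]
  by_cases hn0 : n = 0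
  · have ht0 : t = [] := List.eq_nil_of_length_eq_zero (by omega)
    rw [ht0]
    simp [pvF, pvBScan, hn0, pvRlz]
  · -- n ≥ 1: the scan writes exactly the borrow-in list, then the two results coincide
    have hscan : pvBScan t (n - 1) 0 (List.replicate n 0)
        = pvBL t (n - 1) 0 ++ [0] := by
      rw [pvBScan_eq t (n - 1) 0 _ (by simp)]
      rw [List.drop_replicate]
      have h1 : n - (n - 1) = 1 := by omega
      rw [h1]
      rfl
    rw [hscan]
    have := pvMain base t 0 (Or.inl rfl)
    rw [htlen] at this
    rw [this]
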